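-- pv_equiv track=rewrite | github.com/Alberte98/proyecto-pull-push | python/intercalar_letras.py | intercalar_mayus_minus
-- ===== SOURCE A (Python) =====
-- def intercalar_mayus_minus(cadena):
--     resultado = ""
--     mayusculas = True
--
--     for char in cadena:
--         if char.isalpha():
--             if mayusculas:
--                 resultado += char.upper()
--             else:
--                 resultado += char.lower()
--             mayusculas = not mayusculas
--         else:
--             resultado += char
--
--     return resultado
-- ===== SOURCE B (Python) =====
-- def intercalar_mayus_minus(cadena):
--     letters = [c for c in cadena if c.isalpha()]
--     transformed = [c.upper() if i % 2 == 0 else c.lower() for i, c in enumerate(letters)]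
--     it = iter(transformed)
--     return ''.join(next(it) if c.isalpha() else c for c in cadena)
-- ===== Notes on version B (the rewrite author's own statement) =====
-- stated objective: alternative
-- what changed: Replaces the single stateful case-toggle loop with three phases: extract the letters, case them by index parity, and weave them back into the original positions via an iterator.
import Mathlib
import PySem

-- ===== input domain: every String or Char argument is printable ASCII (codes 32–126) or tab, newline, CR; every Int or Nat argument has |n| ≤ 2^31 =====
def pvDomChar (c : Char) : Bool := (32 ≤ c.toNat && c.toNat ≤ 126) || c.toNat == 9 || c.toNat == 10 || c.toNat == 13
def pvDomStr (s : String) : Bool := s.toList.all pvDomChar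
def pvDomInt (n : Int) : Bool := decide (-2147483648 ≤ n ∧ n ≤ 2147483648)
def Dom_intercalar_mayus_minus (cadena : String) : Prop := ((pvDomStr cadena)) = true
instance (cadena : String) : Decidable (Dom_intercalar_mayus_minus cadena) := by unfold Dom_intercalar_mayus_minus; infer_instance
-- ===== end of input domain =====

-- B replaces A's single stateful case-toggle loop with extract/parity-transform/merge phases (objective: alternative).


-- ===== PORT A =====
-- the for-loop over cadena with accumulator resultado and the toggle mayusculas
def pvALoop : List Char → List Char → Bool → List Char
  | [], resultado, _ => resultado
  | c :: rest, resultado, mayusculas =>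
      if PySem.Chars.isalpha c then
        if mayusculas then
          pvALoop rest (resultado ++ [PySem.Chars.upperChar c]) (!mayusculas)
        else
          pvALoop rest (resultado ++ [PySem.Chars.lowerChar c]) (!mayusculas)
      else
        pvALoop rest (resultado ++ [c]) mayusculas

def intercalar_mayus_minus (cadena : String) : String :=
  String.ofList (pvALoop cadena.toList [] true)

-- ===== PORT B =====
-- merge pass: walk the original chars, drawing the next transformed letter for each alpha position
def pvMerge : List Char → List Char → List Char
  | [], _ => []
  | c :: cs, ts =>
      if PySem.Chars.isalpha c then
        match ts with
        | t :: ts' => t :: pvMerge cs ts'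
        | [] => []          -- unreachable: the iterator holds one item per letter of cadena
      else
        c :: pvMerge cs ts

def intercalar_mayus_minus_alt (cadena : String) : String :=
  let letters := cadena.toList.filter PySem.Chars.isalpha
  let transformed := (PySem.List.enumerate letters).map
    (fun p => if PySem.Int.mod p.1 2 == 0 then PySem.Chars.upperChar p.2 else PySem.Chars.lowerChar p.2)
  String.ofList (pvMerge cadena.toList transformed)

-- ===== PRECONDITION & SPEC =====
def Spec_intercalar_mayus_minus (cadena : String) (out : String) : Prop := out = intercalar_mayus_minus_alt cadena
instance (cadena : String) (out : String) : Decidable (Spec_intercalar_mayus_minus cadena out) := by unfold Spec_intercalar_mayus_minus; infer_instance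

-- ===== CLAIM (what is proved, stated in full; the proofs are below) =====
def Claim_equal_intercalar_mayus_minus : Prop := ∀ (cadena : String), Dom_intercalar_mayus_minus cadena → Spec_intercalar_mayus_minus cadena (intercalar_mayus_minus cadena)

-- ===== LEMMAS AND PROOFS =====

-- alternating-case transform, abstracting B's index-parity map
def pvAlt : Bool → List Char → List Char
  | _, [] => []
  | b, c :: cs => (if b then PySem.Chars.upperChar c else PySem.Chars.lowerChar c) :: pvAlt (!b) cs

theorem pvAlt_eq_enumerate_map (ls : List Char) (s : Int) :
    (PySem.List.enumerate ls s).map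
      (fun p => if PySem.Int.mod p.1 2 == 0 then PySem.Chars.upperChar p.2 else PySem.Chars.lowerChar p.2)
      = pvAlt (PySem.Int.mod s 2 == 0) ls := by
  induction ls generalizing s with
  | nil => simp [PySem.List.enumerate_nil, pvAlt]
  | cons c cs ih =>
    rw [PySem.List.enumerate_cons, List.map_cons, ih]
    have hpar : (PySem.Int.mod (s + 1) 2 == 0) = !(PySem.Int.mod s 2 == 0) := by
      have h1 : Int.fmod (s + 1) 2 = (s + 1) % 2 := by rw [Int.fmod_eq_emod]; simp
      have h2 : Int.fmod s 2 = s % 2 := by rw [Int.fmod_eq_emod]; simp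
      simp only [PySem.Int.mod, h1, h2]
      rcases Int.emod_two_eq_zero_or_one s with h | h <;>
      · have hs : (s + 1) % 2 = (s % 2 + 1) % 2 := by omega
        simp [hs, h]
    rw [hpar, pvAlt]

theorem pvALoop_eq_merge (cs : List Char) (res : List Char) (b : Bool) :
    pvALoop cs res b = res ++ pvMerge cs (pvAlt b (cs.filter PySem.Chars.isalpha)) := by
  induction cs generalizing res b with
  | nil => simp [pvALoop, pvMerge]
  | cons c rest ih =>
    by_cases h : PySem.Chars.isalpha c = true
    · cases b with
      | true =>
        simp [pvALoop, h, pvMerge, pvAlt, ih]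
      | false =>
        simp [pvALoop, h, pvMerge, pvAlt, ih]
    · simp [pvALoop, h, pvMerge, ih]

-- ===== VERDICT (by name: the statement is the Claim_ definition above) =====
theorem intercalar_mayus_minus_spec : Claim_equal_intercalar_mayus_minus := by
  intro cadena _
  unfold Spec_intercalar_mayus_minus intercalar_mayus_minus intercalar_mayus_minus_alt
  simp only [pvALoop_eq_merge, pvAlt_eq_enumerate_map, List.nil_append]
  rfl
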